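-- pv_equiv track=rewrite | github.com/gyfbianhuanyun/DNA2DNA_Codec_for_Homopolymer_constraints | utils.py | cal_homo
-- ===== SOURCE A (Python) =====
-- def cal_homo(dna_seq):
--     dna_base = ''
--     homo_count = 1
--     homo_max = 1
--     for i in range(len(dna_seq)):
--         dna_1_seq = dna_seq[i]
--         for j in range(len(dna_1_seq)):
--             if dna_1_seq[j] == dna_base:
--                 homo_count += 1
--             else:
--                 dna_base = dna_1_seq[j]
--                 homo_count = 1
--             if homo_count > homo_max:
--                 homo_max = homo_count
--     return homo_max
-- ===== SOURCE B (Python) =====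
-- def cal_homo(dna_seq):
--     s = ''.join(dna_seq)
--     best = 1
--     i = 0
--     n = len(s)
--     while i < n:
--         j = i
--         while j < n and s[j] == s[i]:
--             j += 1
--         if j - i > best:
--             best = j - i
--         i = j
--     return best
-- ===== Notes on version B (the rewrite author's own statement) =====
-- stated objective: simpler
-- what changed: B concatenates all sequences once and extracts maximal runs with a two-pointer jump per run, instead of A's nested loops carrying a running base/counter/max state across sequences.
import Mathlib
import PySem

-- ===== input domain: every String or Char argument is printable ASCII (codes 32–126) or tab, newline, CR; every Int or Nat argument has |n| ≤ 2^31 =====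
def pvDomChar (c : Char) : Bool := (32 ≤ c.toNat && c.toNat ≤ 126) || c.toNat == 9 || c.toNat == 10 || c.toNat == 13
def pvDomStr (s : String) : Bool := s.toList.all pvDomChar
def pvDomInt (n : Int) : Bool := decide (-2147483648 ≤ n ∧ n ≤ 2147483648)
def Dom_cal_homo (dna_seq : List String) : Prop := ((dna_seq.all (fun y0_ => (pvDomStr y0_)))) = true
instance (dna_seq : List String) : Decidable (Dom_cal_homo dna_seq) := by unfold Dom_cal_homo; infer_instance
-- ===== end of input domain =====

-- B concatenates the sequences once and measures each maximal run by jumping to its end,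
-- instead of A's nested loops carrying a running base/counter/max state (objective: simpler).

-- ===== PORT A =====
-- A's sentinel dna_base = '' (never equal to any one-char string) is modeled as `none`;
-- a stored one-char string s[j] is `some c`; the comparison s[j] == dna_base is `some c == base`.
def calHomoStep (st : Option Char × Int × Int) (c : Char) : Option Char × Int × Int :=
  let (base, cnt, mx) := st
  let (base, cnt) := if some c == base then (base, cnt + 1) else (some c, 1)
  let mx := if cnt > mx then cnt else mx
  (base, cnt, mx)

def cal_homo (dna_seq : List String) : Int :=
  (dna_seq.foldl (fun st s => s.toList.foldl calHomoStep st) (none, 1, 1)).2.2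

-- ===== PORT B =====
-- inner while loop: j advances while s[j] == s[i]  (takeWhile/dropWhile on the rest)
def runScan : List Char → Int → Int
  | [], best => best
  | c :: rest, best =>
      let run : Int := 1 + (rest.takeWhile (· == c)).length
      runScan (rest.dropWhile (· == c)) (if run > best then run else best)
termination_by l _ => l.length
decreasing_by
  simpa using Nat.lt_succ_of_le (List.length_dropWhile_le _ _)

def cal_homo_alt (dna_seq : List String) : Int :=
  runScan ((dna_seq.map String.toList).flatten) 1

-- ===== PRECONDITION & SPEC =====
def Spec_cal_homo (dna_seq : List String) (out : Int) : Prop := out = cal_homo_alt dna_seq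
instance (dna_seq : List String) (out : Int) : Decidable (Spec_cal_homo dna_seq out) := by unfold Spec_cal_homo; infer_instance

-- ===== CLAIM (what is proved, stated in full; the proofs are below) =====
def Claim_equal_cal_homo : Prop := ∀ (dna_seq : List String), Dom_cal_homo dna_seq → Spec_cal_homo dna_seq (cal_homo dna_seq)

-- ===== LEMMAS AND PROOFS =====

theorem ite_gt_eq_max (b r : Int) : (if r > b then r else b) = max b r := by
  rw [max_def]; split_ifs <;> omega

theorem step_some (b c : Char) (cnt mx : Int) :
    calHomoStep (some b, cnt, mx) c =
      if c = b then (some b, cnt + 1, if cnt + 1 > mx then cnt + 1 else mx)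
      else (some c, 1, if (1 : Int) > mx then 1 else mx) := by
  by_cases hcb : c = b <;> simp [calHomoStep, hcb]

-- invariant: folding A's step over cs from a state holding a current run of b's of length cnt
-- equals B's run scan after finishing that run
theorem foldl_step_eq_runScan (cs : List Char) :
    ∀ (b : Char) (cnt mx : Int), 1 ≤ cnt → cnt ≤ mx →
    (cs.foldl calHomoStep (some b, cnt, mx)).2.2
      = runScan (cs.dropWhile (· == b)) (max mx (cnt + (cs.takeWhile (· == b)).length)) := by
  induction cs with
  | nil =>
    intro b cnt mx h1 h2
    simp [runScan, max_eq_left h2]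
  | cons c cs ih =>
    intro b cnt mx h1 h2
    rw [List.foldl_cons, step_some]
    by_cases hcb : c = b
    · subst hcb
      rw [if_pos rfl, ite_gt_eq_max]
      rw [ih c (cnt + 1) (max mx (cnt + 1)) (by omega) (le_max_right _ _)]
      rw [List.takeWhile_cons_of_pos (by simp), List.dropWhile_cons_of_pos (by simp)]
      congr 1
      simp only [List.length_cons]
      push_cast
      omega
    · rw [if_neg hcb, ite_gt_eq_max, max_eq_left (by omega)]
      rw [ih c 1 mx le_rfl (by omega)]
      rw [List.takeWhile_cons_of_neg (by simp [hcb]), List.dropWhile_cons_of_neg (by simp [hcb])]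
      rw [runScan, ite_gt_eq_max]
      congr 1
      · simp; omega

theorem cal_homo_eq_alt (dna_seq : List String) :
    cal_homo dna_seq = cal_homo_alt dna_seq := by
  unfold cal_homo cal_homo_alt
  rw [show (dna_seq.foldl (fun st s => s.toList.foldl calHomoStep st) (none, 1, 1))
      = ((dna_seq.map String.toList).flatten.foldl calHomoStep (none, 1, 1)) from by
    rw [List.foldl_flatten, List.foldl_map]]
  cases h : (dna_seq.map String.toList).flatten with
  | nil => simp [runScan]
  | cons c cs =>
    rw [List.foldl_cons]
    rw [show calHomoStep (none, 1, 1) c = (some c, 1, 1) from by simp [calHomoStep]]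
    rw [foldl_step_eq_runScan cs c 1 1 le_rfl le_rfl]
    rw [runScan, ite_gt_eq_max]

-- ===== VERDICT (by name: the statement is the Claim_ definition above) =====
theorem cal_homo_spec : Claim_equal_cal_homo := by
  intro dna_seq _
  unfold Spec_cal_homo
  exact cal_homo_eq_alt dna_seq
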